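-- pv_equiv track=rewrite | github.com/ac-Spark/arcreel360 | lib/episode_splitter.py | find_anchor_near_target
-- ===== SOURCE A (Python) =====
-- def find_anchor_near_target(text: str, anchor: str, target_offset: int, window: int = 500) -> list[int]:
--     """在 target_offset 附近視窗內查 anchor，回匹配「末尾」偏移列表（按距 target_offset 排序）。"""
--     search_start = max(0, target_offset - window)
--     search_end = min(len(text), target_offset + window)
--     region = text[search_start:search_end]
--     positions: list[int] = []
--     start = 0
--     while True:
--         idx = region.find(anchor, start)
--         if idx == -1:
--             break
--         positions.append(search_start + idx + len(anchor))  # 錨點末尾的絕對偏移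
--         start = idx + 1
--     positions.sort(key=lambda p: abs(p - target_offset))
--     return positions
-- ===== SOURCE B (Python) =====
-- def find_anchor_near_target(text: str, anchor: str, target_offset: int, window: int = 500) -> list[int]:
--     search_start = max(0, target_offset - window)
--     search_end = min(len(text), target_offset + window)
--     region = text[search_start:search_end]
--     n = len(anchor)
--     positions = [search_start + i + n
--                  for i in range(len(region) + 1)
--                  if region.startswith(anchor, i)]
--     positions.sort(key=lambda p: abs(p - target_offset))
--     return positions
-- ===== Notes on version B (the rewrite author's own statement) =====
-- stated objective: alternative
-- what changed: Replaces the stateful while-loop over str.find with a single list comprehension testing startswith at every candidate position in the window region.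
import Mathlib
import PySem

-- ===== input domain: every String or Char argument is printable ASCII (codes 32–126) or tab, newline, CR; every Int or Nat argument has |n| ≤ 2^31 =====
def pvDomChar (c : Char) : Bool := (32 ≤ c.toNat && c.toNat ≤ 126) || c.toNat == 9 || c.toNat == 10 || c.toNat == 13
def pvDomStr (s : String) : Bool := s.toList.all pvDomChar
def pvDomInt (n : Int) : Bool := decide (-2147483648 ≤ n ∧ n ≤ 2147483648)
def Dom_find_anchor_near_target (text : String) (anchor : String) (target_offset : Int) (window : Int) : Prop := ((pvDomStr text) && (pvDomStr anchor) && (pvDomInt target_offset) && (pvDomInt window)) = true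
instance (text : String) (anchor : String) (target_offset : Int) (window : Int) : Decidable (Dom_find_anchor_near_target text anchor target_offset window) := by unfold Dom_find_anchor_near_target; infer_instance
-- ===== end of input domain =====

-- B replaces A's stateful while/str.find loop by a comprehension testing startswith at
-- every candidate position; same cost, proved to return the identical list (objective: alternative).

-- ===== PORT A =====
-- the 'while True: idx = region.find(anchor, start) …' loop; fuel only makes it total
-- (fuel = region.length + 2 is never exhausted: start strictly increases and find fails past the end)
def pvLoopA (region : List Char) (anchor : List Char) (search_start : Int) :
    Nat → Nat → List Int → List Int
  | 0, _, positions => positions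
  | fuel + 1, start, positions =>
    let idx := PySem.Chars.findFrom region anchor (start : Int) none
    if idx = -1 then positions
    else pvLoopA region anchor search_start fuel (idx.toNat + 1)
      (positions ++ [search_start + idx + (anchor.length : Int)])

def find_anchor_near_target (text : String) (anchor : String) (target_offset : Int) (window : Int) : List Int :=
  let cs := text.toList
  let search_start := max 0 (target_offset - window)
  let search_end := min (cs.length : Int) (target_offset + window)
  let region := PySem.List.slice cs (some search_start) (some search_end)
  let positions := pvLoopA region anchor.toList search_start (region.length + 2) 0 []
  PySem.List.sorted positions (fun p => |p - target_offset|) false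

-- ===== PORT B =====
def find_anchor_near_target_alt (text : String) (anchor : String) (target_offset : Int) (window : Int) : List Int :=
  let cs := text.toList
  let search_start := max 0 (target_offset - window)
  let search_end := min (cs.length : Int) (target_offset + window)
  let region := PySem.List.slice cs (some search_start) (some search_end)
  let n := anchor.toList.length
  let positions := (List.range (region.length + 1)).filterMap (fun i =>
    if PySem.Chars.startswith (region.drop i) anchor.toList
    then some (search_start + (i : Int) + (n : Int)) else none)
  PySem.List.sorted positions (fun p => |p - target_offset|) false

-- ===== PRECONDITION & SPEC =====
def Spec_find_anchor_near_target (text : String) (anchor : String) (target_offset : Int) (window : Int) (out : List Int) : Prop := out = find_anchor_near_target_alt text anchor target_offset window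
instance (text : String) (anchor : String) (target_offset : Int) (window : Int) (out : List Int) : Decidable (Spec_find_anchor_near_target text anchor target_offset window out) := by unfold Spec_find_anchor_near_target; infer_instance

-- ===== CLAIM (what is proved, stated in full; the proofs are below) =====
def Claim_equal_find_anchor_near_target : Prop := ∀ (text : String) (anchor : String) (target_offset : Int) (window : Int), Dom_find_anchor_near_target text anchor target_offset window → Spec_find_anchor_near_target text anchor target_offset window (find_anchor_near_target text anchor target_offset window)

-- ===== LEMMAS AND PROOFS =====

-- find with a start index strictly past the end returns -1 (CPython's quirk, kept by PySem)
theorem pvFindFrom_past_end (s sub : List Char) (k : Nat) (h : s.length < k) :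
    PySem.Chars.findFrom s sub (k : Int) none = -1 := by
  simp only [PySem.Chars.findFrom]
  have h0 : ¬ ((k : Int) < 0) := by omega
  rw [if_neg h0, if_pos (by exact_mod_cast h)]

-- the candidate-scan that B performs, starting at index `start`
def pvScan (region : List Char) (anchor : List Char) (search_start : Int) (start : Nat) : List Int :=
  (List.range' start (region.length + 1 - start)).filterMap (fun i =>
    if anchor.isPrefixOf (region.drop i) then some (search_start + (i : Int) + (anchor.length : Int)) else none)

theorem pvLoopA_eq_scan (region anchor : List Char) (ss : Int) :
    ∀ (fuel start : Nat) (positions : List Int),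
      region.length + 1 ≤ fuel + start → start ≤ region.length + 1 →
      pvLoopA region anchor ss fuel start positions = positions ++ pvScan region anchor ss start := by
  intro fuel
  induction fuel with
  | zero =>
    intro start positions h1 h2
    have : start = region.length + 1 := by omega
    simp [pvLoopA, pvScan, this]
  | succ fuel ih =>
    intro start positions h1 h2
    by_cases hs : start = region.length + 1
    · have hneg : PySem.Chars.findFrom region anchor (start : Int) none = -1 :=
        pvFindFrom_past_end region anchor start (by omega)
      simp only [pvLoopA]
      rw [hneg]
      simp [pvScan, hs]
    · have hsl : start ≤ region.length := by omega
      by_cases hneg : PySem.Chars.findFrom region anchor (start : Int) none = -1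
      · -- no match at or after start: the scan yields nothing
        have hno : ¬ anchor <:+: region.drop start :=
          (PySem.Chars.findFrom_natCast_eq_neg_one_iff region anchor start hsl).mp hneg
        have hall : ∀ i ∈ List.range' start (region.length + 1 - start),
            ¬ anchor.isPrefixOf (region.drop i) := by
          intro i hi hpre
          apply hno
          have hge : start ≤ i := (List.mem_range'_1.mp hi).1
          have hdd : region.drop i = (region.drop start).drop (i - start) := by
            rw [List.drop_drop]; congr 1; omega
          have hsuf : region.drop i <:+ region.drop start := by
            rw [hdd]; exact List.drop_suffix _ _
          exact (List.isPrefixOf_iff_prefix.mp hpre).isInfix.trans hsuf.isInfix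
        have hscan : pvScan region anchor ss start = [] := by
          unfold pvScan
          apply List.filterMap_eq_nil_iff.mpr
          intro i hi
          rw [if_neg (by simpa using hall i hi)]
        simp [pvLoopA, hneg, hscan]
      · obtain ⟨hge, hpre, hmin⟩ :=
          PySem.Chars.findFrom_natCast_spec region anchor start hsl hneg
        set idx := PySem.Chars.findFrom region anchor (start : Int) none with hidx
        have hge0 : (0 : Int) ≤ idx := le_trans (Int.natCast_nonneg start) hge
        have hgeN : start ≤ idx.toNat := by omega
        have hidxle : idx.toNat ≤ region.length := by
          rcases Decidable.em (anchor = []) with he | he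
          · -- empty anchor: minimality forces idx = start
            by_contra h
            have h2 : start < idx.toNat := by omega
            exact hmin start le_rfl h2 (by simp [he])
          · have hne : anchor ≠ [] := he
            have : region.drop idx.toNat ≠ [] := by
              intro h0
              rw [h0] at hpre
              exact hne (List.prefix_nil.mp hpre)
            have := List.drop_eq_nil_iff.not.mp this
            omega
        have hcast : ((idx.toNat : Int)) = idx := Int.toNat_of_nonneg hge0
        -- unfold one loop step
        have hstep : pvLoopA region anchor ss (fuel + 1) start positions =
            pvLoopA region anchor ss fuel (idx.toNat + 1)
              (positions ++ [ss + idx + (anchor.length : Int)]) := by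
          simp only [pvLoopA, ← hidx]
          rw [if_neg hneg]
        rw [hstep, ih (idx.toNat + 1) _ (by omega) (by omega)]
        -- now split the scan at idx.toNat
        have hsplit : pvScan region anchor ss start =
            [ss + idx + (anchor.length : Int)] ++ pvScan region anchor ss (idx.toNat + 1) := by
          unfold pvScan
          have hlen : region.length + 1 - start =
              (idx.toNat - start) + (1 + (region.length + 1 - (idx.toNat + 1))) := by omega
          rw [hlen, ← List.range'_append_1, List.filterMap_append, ← List.range'_append_1,
            List.filterMap_append]
          have hfirst : (List.range' start (idx.toNat - start)).filterMap (fun i =>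
              if anchor.isPrefixOf (region.drop i)
              then some (ss + (i : Int) + (anchor.length : Int)) else none) = [] := by
            apply List.filterMap_eq_nil_iff.mpr
            intro i hi
            obtain ⟨hi1, hi2⟩ := List.mem_range'_1.mp hi
            rw [if_neg]
            intro hp
            exact hmin i hi1 (by omega) (List.isPrefixOf_iff_prefix.mp hp)
          have hat : (List.range' (start + (idx.toNat - start)) 1).filterMap (fun i =>
              if anchor.isPrefixOf (region.drop i)
              then some (ss + (i : Int) + (anchor.length : Int)) else none) =
              [ss + idx + (anchor.length : Int)] := by
            have heq : start + (idx.toNat - start) = idx.toNat := by omega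
            rw [heq]
            simp only [List.range'_one, List.filterMap_cons, List.filterMap_nil]
            rw [if_pos (List.isPrefixOf_iff_prefix.mpr hpre)]
            simp [hcast]
          rw [hfirst, hat]
          have heq2 : start + (idx.toNat - start) + 1 = idx.toNat + 1 := by omega
          rw [heq2]
          simp
        rw [hsplit]
        simp

-- B's comprehension is the scan from 0
theorem pvScan_zero (region anchor : List Char) (ss : Int) :
    (List.range (region.length + 1)).filterMap (fun i =>
      if PySem.Chars.startswith (region.drop i) anchor
      then some (ss + (i : Int) + (anchor.length : Int)) else none) =
    pvScan region anchor ss 0 := by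
  unfold pvScan
  rw [List.range_eq_range']
  simp [PySem.Chars.startswith]

-- ===== VERDICT (by name: the statement is the Claim_ definition above) =====
theorem find_anchor_near_target_spec : Claim_equal_find_anchor_near_target := by
  intro text anchor target_offset window _
  unfold Spec_find_anchor_near_target find_anchor_near_target find_anchor_near_target_alt
  simp only []
  rw [pvLoopA_eq_scan _ _ _ (_ + 2) 0 [] (by omega) (by omega), pvScan_zero]
  simp
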